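-- pv_equiv track=rewrite | github.com/Grindin247/family-cloud | apps/decision-system/apps/api/app/schemas/notes.py | _normalize_note_path
-- ===== SOURCE A (Python) =====
-- def _normalize_note_path(value: str) -> str:
--     """Normalize slash usage and collapse adjacent duplicate path segments."""
--     raw = (value or "").strip()
--     if not raw:
--         return raw
--     parts = [segment.strip() for segment in raw.split("/") if segment.strip()]
--     normalized: list[str] = []
--     for segment in parts:
--         if normalized and normalized[-1].lower() == segment.lower():
--             continue
--         normalized.append(segment)
--     if not normalized:
--         return "/"
--     return "/" + "/".join(normalized)
-- ===== SOURCE B (Python) =====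
-- def _group_heads(parts):
--     """First element of each maximal run of case-insensitively equal adjacent segments."""
--     if not parts:
--         return []
--     head = parts[0]
--     i = 1
--     while i < len(parts) and parts[i].lower() == head.lower():
--         i += 1
--     return [head] + _group_heads(parts[i:])
--
--
-- def _normalize_note_path(value: str) -> str:
--     """Normalize slash usage and collapse adjacent duplicate path segments."""
--     raw = (value or "").strip()
--     if not raw:
--         return raw
--     parts = [segment.strip() for segment in raw.split("/") if segment.strip()]
--     normalized = _group_heads(parts)
--     if not normalized:
--         return "/"
--     return "/" + "/".join(normalized)
-- ===== Notes on version B (the rewrite author's own statement) =====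
-- stated objective: alternative
-- what changed: The stateful accumulator loop comparing each segment with the last kept element is replaced by a stateless recursion on maximal runs: take the first segment, skip its whole case-insensitive run, recurse on the remainder.
import Mathlib
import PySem

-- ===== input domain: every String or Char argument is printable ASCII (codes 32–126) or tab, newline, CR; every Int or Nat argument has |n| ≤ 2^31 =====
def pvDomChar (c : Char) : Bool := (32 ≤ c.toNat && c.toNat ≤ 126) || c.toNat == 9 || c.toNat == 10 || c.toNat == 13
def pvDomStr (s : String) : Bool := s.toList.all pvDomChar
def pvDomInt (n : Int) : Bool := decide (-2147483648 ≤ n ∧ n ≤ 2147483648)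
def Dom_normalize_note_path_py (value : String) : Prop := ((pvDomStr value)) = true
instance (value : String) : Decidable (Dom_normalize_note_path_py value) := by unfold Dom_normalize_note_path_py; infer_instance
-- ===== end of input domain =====

-- B replaces A's stateful last-kept-element accumulator loop by a stateless recursion on
-- maximal runs of case-insensitively equal adjacent segments (alternative decomposition, same cost).

-- ===== PORT A =====
def normalize_note_path_py (value : String) : String :=
  let raw := PySem.Str.strip value
  if raw = "" then raw
  else
    let parts := (((PySem.Str.split? raw "/").getD []).map PySem.Str.strip).filter (fun s => s ≠ "")
    let normalized := parts.foldl
      (fun normalized segment =>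
        if normalized ≠ [] ∧ PySem.Str.lower (normalized.getLastD "") = PySem.Str.lower segment
        then normalized
        else normalized ++ [segment]) []
    if normalized = [] then "/"
    else "/" ++ PySem.Str.join "/" normalized

-- ===== PORT B =====
-- Source B's _group_heads: head of the list, then the inner while loop skips the rest of the
-- head's case-insensitive run (= dropWhile on the tail), then recurse on the remainder.
def groupHeads (parts : List String) : List String :=
  match parts with
  | [] => []
  | head :: rest =>
      head :: groupHeads (rest.dropWhile (fun s => PySem.Str.lower s == PySem.Str.lower head))
termination_by parts.length
decreasing_by
  simp only [List.length_cons]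
  exact Nat.lt_succ_of_le (List.length_dropWhile_le _ _)

def normalize_note_path_py_alt (value : String) : String :=
  let raw := PySem.Str.strip value
  if raw = "" then raw
  else
    let parts := (((PySem.Str.split? raw "/").getD []).map PySem.Str.strip).filter (fun s => s ≠ "")
    let normalized := groupHeads parts
    if normalized = [] then "/"
    else "/" ++ PySem.Str.join "/" normalized

-- ===== PRECONDITION & SPEC =====
def Spec_normalize_note_path_py (value : String) (out : String) : Prop := out = normalize_note_path_py_alt value
instance (value : String) (out : String) : Decidable (Spec_normalize_note_path_py value out) := by unfold Spec_normalize_note_path_py; infer_instance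

-- ===== CLAIM (what is proved, stated in full; the proofs are below) =====
def Claim_equal_normalize_note_path_py : Prop := ∀ (value : String), Dom_normalize_note_path_py value → Spec_normalize_note_path_py value (normalize_note_path_py value)

-- ===== LEMMAS AND PROOFS =====

-- the tail of A's collapse, parametrised by the last kept segment p
def tailRuns (p : String) : List String → List String
  | [] => []
  | s :: rest =>
      if PySem.Str.lower p = PySem.Str.lower s then tailRuns p rest
      else s :: tailRuns s rest

lemma foldl_step_eq_tailRuns (l acc : List String) (h : acc ≠ []) :
    l.foldl
      (fun normalized segment =>
        if normalized ≠ [] ∧ PySem.Str.lower (normalized.getLastD "") = PySem.Str.lower segment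
        then normalized
        else normalized ++ [segment]) acc
      = acc ++ tailRuns (acc.getLastD "") l := by
  induction l generalizing acc with
  | nil => simp [tailRuns]
  | cons s rest ih =>
      simp only [List.foldl_cons, tailRuns]
      by_cases hc : PySem.Str.lower (acc.getLastD "") = PySem.Str.lower s
      · rw [if_pos ⟨h, hc⟩, if_pos hc, ih acc h]
      · rw [if_neg (fun hand => hc hand.2), if_neg hc, ih (acc ++ [s]) (by simp)]
        simp

lemma tailRuns_eq_groupHeads (l : List String) (p : String) :
    tailRuns p l = groupHeads (l.dropWhile (fun s => PySem.Str.lower s == PySem.Str.lower p)) := by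
  induction l generalizing p with
  | nil => simp [tailRuns, groupHeads]
  | cons s rest ih =>
      by_cases hc : PySem.Str.lower p = PySem.Str.lower s
      · rw [tailRuns, if_pos hc, List.dropWhile_cons_of_pos (by simp [hc]), ih p]
      · rw [tailRuns, if_neg hc,
          List.dropWhile_cons_of_neg
            (by simp only [beq_iff_eq]
                exact fun h => hc h.symm), groupHeads, ih s]

lemma foldl_step_eq_groupHeads (parts : List String) :
    parts.foldl
      (fun normalized segment =>
        if normalized ≠ [] ∧ PySem.Str.lower (normalized.getLastD "") = PySem.Str.lower segment
        then normalized
        else normalized ++ [segment]) []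
      = groupHeads parts := by
  cases parts with
  | nil => simp [groupHeads]
  | cons s rest =>
      rw [List.foldl_cons, if_neg (by simp), List.nil_append,
        foldl_step_eq_tailRuns rest [s] (by simp), groupHeads]
      simp [tailRuns_eq_groupHeads]

-- ===== VERDICT (by name: the statement is the Claim_ definition above) =====
theorem normalize_note_path_py_spec : Claim_equal_normalize_note_path_py := by
  intro value _
  simp only [Spec_normalize_note_path_py, normalize_note_path_py, normalize_note_path_py_alt,
    foldl_step_eq_groupHeads]
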